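-- pv_equiv track=rewrite | github.com/upkero/university | course2/sem4/AOIS/lab2/src/minimization.py | _combine_patterns
-- ===== SOURCE A (Python) =====
-- def _combine_patterns(left: str, right: str) -> str | None:
--     diff_count = 0
--     combined: list[str] = []
--     for left_bit, right_bit in zip(left, right):
--         if left_bit == right_bit:
--             combined.append(left_bit)
--             continue
--         if left_bit == "-" or right_bit == "-":
--             return None
--         diff_count += 1
--         combined.append("-")
--         if diff_count > 1:
--             return None
--     if diff_count != 1:
--         return None
--     return "".join(combined)
-- ===== SOURCE B (Python) =====
-- def _combine_patterns(left: str, right: str) -> str | None: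
--     pairs = list(zip(left, right))
--     diffs = [i for i, (l, r) in enumerate(pairs) if l != r]
--     if len(diffs) != 1:
--         return None
--     i = diffs[0]
--     l, r = pairs[i]
--     if l == "-" or r == "-":
--         return None
--     chars = [c for c, _ in pairs]
--     chars[i] = "-"
--     return "".join(chars)
-- ===== Notes on version B (the rewrite author's own statement) =====
-- stated objective: alternative
-- what changed: Replaces A's single stateful scan (diff counter, incremental accumulator, mid-loop early returns) with a collect-then-reconstruct decomposition: gather all differing indices in one comprehension, require exactly one, then rebuild the result from the left pattern with that position replaced by '-'.
import Mathlib
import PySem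

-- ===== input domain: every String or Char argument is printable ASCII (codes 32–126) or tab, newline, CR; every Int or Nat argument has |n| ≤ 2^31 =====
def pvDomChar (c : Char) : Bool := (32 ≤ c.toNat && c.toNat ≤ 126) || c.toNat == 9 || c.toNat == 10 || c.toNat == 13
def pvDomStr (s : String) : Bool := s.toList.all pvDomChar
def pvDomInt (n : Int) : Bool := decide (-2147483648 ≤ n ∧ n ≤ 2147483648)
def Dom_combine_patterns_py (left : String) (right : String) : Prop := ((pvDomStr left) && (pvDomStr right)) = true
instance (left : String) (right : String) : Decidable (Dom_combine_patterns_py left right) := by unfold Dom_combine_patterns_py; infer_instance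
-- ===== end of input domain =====

-- B replaces A's stateful scan (diff counter + incremental accumulator + mid-loop returns)
-- with a collect-indices-then-reconstruct decomposition; same cost, alternative structure.


-- ===== PORT A =====
-- the for-loop of A with state (diff_count, combined); early returns become 'none'
def pvLoopA : List (Char × Char) → Int → List Char → Option String
  | [], diff_count, combined =>
      if diff_count ≠ 1 then none else some (String.mk combined)
  | (left_bit, right_bit) :: rest, diff_count, combined =>
      if left_bit = right_bit then
        pvLoopA rest diff_count (combined ++ [left_bit])
      else if left_bit = '-' ∨ right_bit = '-' then none
      else
        let diff_count := diff_count + 1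
        let combined := combined ++ ['-']
        if diff_count > 1 then none
        else pvLoopA rest diff_count combined

def combine_patterns_py (left : String) (right : String) : Option String :=
  pvLoopA (left.toList.zip right.toList) 0 []

-- ===== PORT B =====
def combine_patterns_py_alt (left : String) (right : String) : Option String :=
  let pairs := left.toList.zip right.toList
  -- diffs = [i for i, (l, r) in enumerate(pairs) if l != r]
  let diffs := (PySem.List.enumerate pairs 0).filterMap
      (fun p => if p.2.1 != p.2.2 then some p.1 else none)
  match diffs with
  | [i] =>
      match PySem.List.pyGet? pairs i with        -- l, r = pairs[i]
      | some (l, r) =>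
          if l = '-' ∨ r = '-' then none
          else
            let chars := pairs.map Prod.fst       -- chars = [c for c, _ in pairs]
            match PySem.List.pySet? chars i '-' with  -- chars[i] = "-"
            | some chars => some (String.mk chars)
            | none => none                        -- unreachable: i is in range
      | none => none                              -- unreachable: i is in range
  | _ => none

-- ===== PRECONDITION & SPEC =====
def Spec_combine_patterns_py (left : String) (right : String) (out : Option String) : Prop := out = combine_patterns_py_alt left right
instance (left : String) (right : String) (out : Option String) : Decidable (Spec_combine_patterns_py left right out) := by unfold Spec_combine_patterns_py; infer_instance

-- ===== CLAIM (what is proved, stated in full; the proofs are below) =====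
def Claim_equal_combine_patterns_py : Prop := ∀ (left : String) (right : String), Dom_combine_patterns_py left right → Spec_combine_patterns_py left right (combine_patterns_py left right)

-- ===== LEMMAS AND PROOFS =====

-- proof-side: the positions (as Nats) where the two patterns differ
def dIdxN : List (Char × Char) → List Nat
  | [] => []
  | (l, r) :: t => if l ≠ r then 0 :: (dIdxN t).map (· + 1) else (dIdxN t).map (· + 1)

lemma dIdxN_lt {ps : List (Char × Char)} {n : Nat} (h : n ∈ dIdxN ps) : n < ps.length := by
  induction ps generalizing n with
  | nil => simp [dIdxN] at h
  | cons p t ih =>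
      obtain ⟨l, r⟩ := p
      by_cases hlr : l = r <;> simp [dIdxN, hlr] at h
      · obtain ⟨m, hm, rfl⟩ := h
        have := ih hm; simp; omega
      · rcases h with rfl | ⟨m, hm, rfl⟩
        · simp
        · have := ih hm; simp; omega

lemma dIdxN_nil_iff (ps : List (Char × Char)) :
    dIdxN ps = [] ↔ ps.all (fun p => p.1 == p.2) = true := by
  induction ps with
  | nil => simp [dIdxN]
  | cons p t ih =>
      obtain ⟨l, r⟩ := p
      by_cases hlr : l = r <;> simp [dIdxN, hlr, ih]

-- bridge: B's enumerate/filter comprehension computes dIdxN, shifted by the start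
lemma enum_filter_eq (ps : List (Char × Char)) (k : Int) :
    (PySem.List.enumerate ps k).filterMap
        (fun p => if p.2.1 != p.2.2 then some p.1 else none)
      = (dIdxN ps).map (fun n : Nat => k + (n : Int)) := by
  induction ps generalizing k with
  | nil => simp [PySem.List.enumerate_nil, dIdxN]
  | cons p t ih =>
      obtain ⟨l, r⟩ := p
      have ih' := ih (k + 1)
      simp only [bne_iff_ne, ne_eq, ite_not] at ih' ⊢
      by_cases hlr : l = r
      · subst hlr
        simp [PySem.List.enumerate_cons, dIdxN, ih', List.map_map]
        intro a _
        ring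
      · simp [PySem.List.enumerate_cons, dIdxN, hlr, ih', List.map_map]
        intro a _
        ring

lemma enum_filter_eq0 (ps : List (Char × Char)) :
    (PySem.List.enumerate ps 0).filterMap
        (fun p => if p.2.1 != p.2.2 then some p.1 else none)
      = (dIdxN ps).map (fun n : Nat => (n : Int)) := by
  have h := enum_filter_eq ps 0
  simp only [zero_add] at h
  exact h

-- the value of A's loop once diff_count has reached 1
lemma loopA_one (ps : List (Char × Char)) (comb : List Char) :
    pvLoopA ps 1 comb =
      if ps.all (fun p => p.1 == p.2) then some (String.mk (comb ++ ps.map Prod.fst)) else none := by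
  induction ps generalizing comb with
  | nil => simp [pvLoopA]
  | cons p t ih =>
      obtain ⟨l, r⟩ := p
      by_cases hlr : l = r
      · simp only [pvLoopA, if_pos hlr, ih, List.all_cons, List.map_cons]
        by_cases ht : t.all (fun p => p.1 == p.2) <;> simp [hlr, ht]
      · simp only [pvLoopA, if_neg hlr]
        split
        · simp [hlr]
        · norm_num
          simp [hlr]

-- closed characterisation of A's loop from the fresh state
lemma loopA_zero (ps : List (Char × Char)) (comb : List Char) :
    pvLoopA ps 0 comb =
      match dIdxN ps with
      | [n] =>
          match ps[n]? with
          | some (l, r) =>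
              if l = '-' ∨ r = '-' then none
              else some (String.mk (comb ++ (ps.map Prod.fst).set n '-'))
          | none => none
      | _ => none := by
  induction ps generalizing comb with
  | nil => simp [pvLoopA, dIdxN]
  | cons p t ih =>
      obtain ⟨l, r⟩ := p
      by_cases hlr : l = r
      · have hstep : pvLoopA ((l, r) :: t) 0 comb = pvLoopA t 0 (comb ++ [l]) := by
          simp [pvLoopA, hlr]
        rw [hstep, ih]
        rcases ht : dIdxN t with _ | ⟨n, _ | ⟨m, rest⟩⟩ <;> simp [dIdxN, hlr, ht]
      · by_cases hd : l = '-' ∨ r = '-'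
        · have hL : pvLoopA ((l, r) :: t) 0 comb = none := by
            simp [pvLoopA, hlr, hd]
          rw [hL]
          rcases ht : dIdxN t with _ | ⟨n, rest⟩ <;> simp [dIdxN, hlr, ht, hd]
        · have hL : pvLoopA ((l, r) :: t) 0 comb = pvLoopA t 1 (comb ++ ['-']) := by
            simp only [pvLoopA, if_neg hlr, if_neg hd]
            norm_num
          rw [hL, loopA_one]
          rcases ht : dIdxN t with _ | ⟨n, rest⟩
          · have hall : t.all (fun p => p.1 == p.2) = true := (dIdxN_nil_iff t).mp ht
            simp [dIdxN, hlr, ht, hd, hall]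
          · have hnall : ¬ t.all (fun p => p.1 == p.2) = true := by
              intro h
              rw [← dIdxN_nil_iff] at h
              simp [h] at ht
            simp only [dIdxN, if_pos hlr, ht, List.map_cons, hnall]
            rcases rest <;> simp

-- ===== VERDICT (by name: the statement is the Claim_ definition above) =====
theorem combine_patterns_py_spec : Claim_equal_combine_patterns_py := by
  intro left right _
  unfold Spec_combine_patterns_py combine_patterns_py combine_patterns_py_alt
  rw [loopA_zero]
  simp only [enum_filter_eq0]
  rcases ht : dIdxN (left.toList.zip right.toList) with _ | ⟨n, _ | ⟨m, rest⟩⟩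
  · rfl
  · simp only [List.map_cons, List.map_nil]
    have hn : n < (left.toList.zip right.toList).length := dIdxN_lt (by simp [ht])
    rw [PySem.List.pyGet?_natCast]
    rcases hg : (left.toList.zip right.toList)[n]? with _ | ⟨a, b⟩
    · rw [List.getElem?_eq_getElem hn] at hg
    · simp only
      split
      · rfl
      · have hlen : n < (List.map Prod.fst (left.toList.zip right.toList)).length := by
          simpa using hn
        rw [PySem.List.pySet?_natCast _ _ _ hlen]
        simp
  · rfl
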